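-- pv_equiv track=rewrite | github.com/requireSol/piano_identification | improve_measure.py | merge_pause_and_note
-- ===== SOURCE A (Python) =====
-- def merge_pause_and_note(valuesofline, tones):
--     for index, value in enumerate(valuesofline[:]):
--         if value % 2 == 1 and tones[index] == 'z':
--             possible_values = []
--             for ind, val in enumerate(valuesofline[:]):
--                 if val % 2 == 1 and not tones[ind] == 'z':
--                     # 1. Value | 2. Index | 3. distance to pause
--                     possible_values.append((val, ind, abs(index - ind)))
--             if len(possible_values) > 0:
--                 merge_partner = possible_values[0]
--                 for i in range(1, len(possible_values)):
--                     if possible_values[i][2] < merge_partner[2]: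
--                         merge_partner = possible_values[i]
--                 valuesofline[index] -= 1
--                 valuesofline[merge_partner[1]] += 1
--
--     return valuesofline
-- ===== SOURCE B (Python) =====
-- def merge_pause_and_note(valuesofline, tones):
--     notes = [j for j, v in enumerate(valuesofline) if v % 2 == 1 and tones[j] != 'z']
--     pauses = [i for i, v in enumerate(valuesofline) if v % 2 == 1 and tones[i] == 'z']
--     for i in pauses:
--         if notes:
--             j = min(notes, key=lambda k: abs(i - k))
--             notes.remove(j)
--             valuesofline[i] -= 1
--             valuesofline[j] += 1
--     return valuesofline
-- ===== Notes on version B (the rewrite author's own statement) =====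
-- stated objective: simpler
-- what changed: B precomputes the pause indices and the list of available odd-note indices once, then walks the pauses keeping that shrinking note list (min by distance, first wins, remove on match), so A's per-pause rescan of valuesofline that rebuilds the candidate triple list disappears.
import Mathlib
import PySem

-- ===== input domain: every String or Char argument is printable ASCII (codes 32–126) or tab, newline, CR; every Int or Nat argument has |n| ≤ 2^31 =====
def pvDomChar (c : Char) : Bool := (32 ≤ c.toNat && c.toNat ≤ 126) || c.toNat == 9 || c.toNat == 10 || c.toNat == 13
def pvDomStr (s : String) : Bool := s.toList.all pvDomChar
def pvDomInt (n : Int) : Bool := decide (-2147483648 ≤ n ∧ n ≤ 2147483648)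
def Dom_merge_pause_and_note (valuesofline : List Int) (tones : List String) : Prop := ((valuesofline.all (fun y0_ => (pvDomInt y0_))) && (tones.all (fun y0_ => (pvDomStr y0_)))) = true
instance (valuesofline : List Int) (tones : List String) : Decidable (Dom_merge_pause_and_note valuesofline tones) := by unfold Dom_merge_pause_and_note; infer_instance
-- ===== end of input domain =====

-- B precomputes the pause indices and the available odd-note indices once and walks the pauses
-- maintaining that shrinking note list, a shorter decomposition than A's per-pause rescan of
-- valuesofline. Both Pythons mutate valuesofline in place in the same way; the equivalence
-- proved here is about the returned list.


-- ===== PORT A =====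
def merge_pause_and_note (valuesofline : List Int) (tones : List String) : List Int :=
  (PySem.List.enumerate valuesofline).foldl
    (fun v p =>
      if PySem.Int.mod p.2 2 == 1 && (PySem.List.pyGetD tones p.1 "" == "z") then
        let possible_values : List (Int × Int × Int) :=
          (PySem.List.enumerate v).foldl
            (fun acc q =>
              if PySem.Int.mod q.2 2 == 1 && !(PySem.List.pyGetD tones q.1 "" == "z") then
                acc ++ [(q.2, q.1, |p.1 - q.1|)]
              else acc) []
        if 0 < possible_values.length then
          let merge_partner :=
            (PySem.List.pyRange 1 (PySem.List.len possible_values)).foldl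
              (fun mp i =>
                if (PySem.List.pyGetD possible_values i (0, 0, 0)).2.2 < mp.2.2 then
                  PySem.List.pyGetD possible_values i (0, 0, 0)
                else mp)
              (PySem.List.pyGetD possible_values 0 (0, 0, 0))
          let v1 := PySem.List.pySetD v p.1 (PySem.List.pyGetD v p.1 0 - 1)
          PySem.List.pySetD v1 merge_partner.2.1 (PySem.List.pyGetD v1 merge_partner.2.1 0 + 1)
        else v
      else v)
    valuesofline

-- ===== PORT B =====
def merge_pause_and_note_alt (valuesofline : List Int) (tones : List String) : List Int :=
  let notes : List Int :=
    (PySem.List.enumerate valuesofline).filterMap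
      (fun q => if PySem.Int.mod q.2 2 == 1 && !(PySem.List.pyGetD tones q.1 "" == "z") then some q.1 else none)
  let pauses : List Int :=
    (PySem.List.enumerate valuesofline).filterMap
      (fun q => if PySem.Int.mod q.2 2 == 1 && (PySem.List.pyGetD tones q.1 "" == "z") then some q.1 else none)
  (pauses.foldl
    (fun st i =>
      match PySem.List.min? st.2 (fun k => |i - k|) with
      | none => st
      | some j =>
          let v1 := PySem.List.pySetD st.1 i (PySem.List.pyGetD st.1 i 0 - 1)
          (PySem.List.pySetD v1 j (PySem.List.pyGetD v1 j 0 + 1),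
           (PySem.List.remove? st.2 j).getD st.2))
    (valuesofline, notes)).1

-- ===== PRECONDITION & SPEC =====
-- Pre_ excludes exactly the inputs on which the Python A raises IndexError: an odd value at a
-- position with no corresponding entry in tones (B raises there too).
def Pre_merge_pause_and_note (valuesofline : List Int) (tones : List String) : Prop :=
  ∀ k, k < valuesofline.length → PySem.Int.mod (valuesofline.getD k 0) 2 = 1 → k < tones.length
instance (valuesofline : List Int) (tones : List String) : Decidable (Pre_merge_pause_and_note valuesofline tones) := by unfold Pre_merge_pause_and_note; infer_instance
def pvWitness_merge_pause_and_note : List Int × List String := ([1, 2, 3], ["z", "x", "a"])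
def Spec_merge_pause_and_note (valuesofline : List Int) (tones : List String) (out : List Int) : Prop := out = merge_pause_and_note_alt valuesofline tones
instance (valuesofline : List Int) (tones : List String) (out : List Int) : Decidable (Spec_merge_pause_and_note valuesofline tones out) := by unfold Spec_merge_pause_and_note; infer_instance

-- ===== CLAIM (what is proved, stated in full; the proofs are below) =====
def Claim_equal_merge_pause_and_note : Prop := ∀ (valuesofline : List Int) (tones : List String), Dom_merge_pause_and_note valuesofline tones → Pre_merge_pause_and_note valuesofline tones → Spec_merge_pause_and_note valuesofline tones (merge_pause_and_note valuesofline tones)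

-- ===== LEMMAS AND PROOFS =====

-- selection predicates used by both programs (guards of the loops, over (index, value) pairs)
def pvNoteSel (tones : List String) (q : Int × Int) : Bool :=
  PySem.Int.mod q.2 2 == 1 && !(PySem.List.pyGetD tones q.1 "" == "z")
def pvPauseSel (tones : List String) (q : Int × Int) : Bool :=
  PySem.Int.mod q.2 2 == 1 && (PySem.List.pyGetD tones q.1 "" == "z")

-- the body of A's outer loop at pause index i (exactly the then-branch of the port)
def pvBodyA (tones : List String) (v : List Int) (i : Int) : List Int :=
  let possible_values : List (Int × Int × Int) :=
    (PySem.List.enumerate v).foldl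
      (fun acc q =>
        if pvNoteSel tones q then
          acc ++ [(q.2, q.1, |i - q.1|)]
        else acc) []
  if 0 < possible_values.length then
    let merge_partner :=
      (PySem.List.pyRange 1 (PySem.List.len possible_values)).foldl
        (fun mp i' =>
          if (PySem.List.pyGetD possible_values i' (0, 0, 0)).2.2 < mp.2.2 then
            PySem.List.pyGetD possible_values i' (0, 0, 0)
          else mp)
        (PySem.List.pyGetD possible_values 0 (0, 0, 0))
    let v1 := PySem.List.pySetD v i (PySem.List.pyGetD v i 0 - 1)
    PySem.List.pySetD v1 merge_partner.2.1 (PySem.List.pyGetD v1 merge_partner.2.1 0 + 1)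
  else v

-- B's loop step
def pvStepB (tones : List String) (st : List Int × List Int) (i : Int) : List Int × List Int :=
  match PySem.List.min? st.2 (fun k => |i - k|) with
  | none => st
  | some j =>
      let v1 := PySem.List.pySetD st.1 i (PySem.List.pyGetD st.1 i 0 - 1)
      (PySem.List.pySetD v1 j (PySem.List.pyGetD v1 j 0 + 1),
       (PySem.List.remove? st.2 j).getD st.2)

-- indices selected by sel, scanning v with running index s
def pvSelIdx (sel : Int × Int → Bool) : Int → List Int → List Int
  | _, [] => []
  | s, a :: t => if sel (s, a) then s :: pvSelIdx sel (s + 1) t else pvSelIdx sel (s + 1) t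

theorem pvSelIdx_eq_filterMap (sel : Int × Int → Bool) :
    ∀ (v : List Int) (s : Int),
      (PySem.List.enumerate v s).filterMap (fun q => if sel q then some q.1 else none)
        = pvSelIdx sel s v := by
  intro v
  induction v with
  | nil => intro s; simp [PySem.List.enumerate, pvSelIdx]
  | cons a t ih =>
      intro s
      rw [PySem.List.enumerate_cons]
      by_cases h : sel (s, a) <;> simp [List.filterMap_cons, h, pvSelIdx, ih]

theorem pvSelIdx_eq_map_filter (sel : Int × Int → Bool) :
    ∀ (v : List Int) (s : Int),
      pvSelIdx sel s v = ((PySem.List.enumerate v s).filter sel).map (·.1) := by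
  intro v
  induction v with
  | nil => intro s; simp [PySem.List.enumerate, pvSelIdx]
  | cons a t ih =>
      intro s
      rw [PySem.List.enumerate_cons]
      by_cases h : sel (s, a) <;> simp [List.filter_cons, h, pvSelIdx, ih]

theorem pvMem_selIdx (sel : Int × Int → Bool) :
    ∀ (v : List Int) (s j : Int),
      j ∈ pvSelIdx sel s v ↔ ∃ k : Nat, k < v.length ∧ j = s + (k : Int) ∧ sel (j, v.getD k 0) = true := by
  intro v
  induction v with
  | nil => intro s j; simp [pvSelIdx]
  | cons a t ih =>
      intro s j
      constructor
      · intro hm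
        by_cases h : sel (s, a)
        · simp only [pvSelIdx, h, if_true, List.mem_cons] at hm
          rcases hm with rfl | hm
          · exact ⟨0, by simp, by simp, by simpa using h⟩
          · rcases (ih (s + 1) j).mp hm with ⟨k, hk, rfl, hsel⟩
            exact ⟨k + 1, by simp only [List.length_cons]; omega, by push_cast; ring, by simpa using hsel⟩
        · simp only [pvSelIdx, h, if_false] at hm
          rcases (ih (s + 1) j).mp hm with ⟨k, hk, rfl, hsel⟩
          exact ⟨k + 1, by simp only [List.length_cons]; omega, by push_cast; ring, by simpa using hsel⟩
      · rintro ⟨k, hk, rfl, hsel⟩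
        cases k with
        | zero =>
            simp only [Nat.cast_zero, add_zero] at hsel ⊢
            simp only [List.getD_cons_zero] at hsel
            simp [pvSelIdx, hsel]
        | succ k =>
            have : s + ((k + 1 : Nat) : Int) = (s + 1) + (k : Int) := by push_cast; ring
            rw [this] at hsel ⊢
            have hmem : (s + 1) + (k : Int) ∈ pvSelIdx sel (s + 1) t :=
              (ih (s + 1) _).mpr ⟨k, by simp only [List.length_cons] at hk; omega, rfl, by simpa using hsel⟩
            by_cases h : sel (s, a) <;> simp [pvSelIdx, h, hmem]

theorem pvSelIdx_set_irrel (sel : Int × Int → Bool) :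
    ∀ (v : List Int) (s : Int) (n : Nat) (x : Int),
      sel (s + (n : Int), x) = sel (s + (n : Int), v.getD n 0) →
      pvSelIdx sel s (v.set n x) = pvSelIdx sel s v := by
  intro v
  induction v with
  | nil => intro s n x _; simp
  | cons a t ih =>
      intro s n x hsel
      cases n with
      | zero =>
          simp only [Nat.cast_zero, add_zero, List.getD_cons_zero] at hsel
          simp [pvSelIdx, List.set_cons_zero, hsel]
      | succ n =>
          have hc : s + ((n + 1 : Nat) : Int) = (s + 1) + (n : Int) := by push_cast; ring
          rw [hc] at hsel
          simp only [List.set_cons_succ, List.getD_cons_succ] at hsel ⊢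
          by_cases h : sel (s, a) <;> simp [pvSelIdx, h, ih (s + 1) n x hsel]

theorem pvSelIdx_set_erase (sel : Int × Int → Bool) :
    ∀ (v : List Int) (s : Int) (n : Nat) (x : Int),
      n < v.length →
      sel (s + (n : Int), v.getD n 0) = true →
      sel (s + (n : Int), x) = false →
      pvSelIdx sel s (v.set n x) = (pvSelIdx sel s v).erase (s + (n : Int)) := by
  intro v
  induction v with
  | nil => intro s n x h; simp at h
  | cons a t ih =>
      intro s n x hn hsel hx
      cases n with
      | zero =>
          simp only [Nat.cast_zero, add_zero, List.getD_cons_zero] at hsel hx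
          simp [pvSelIdx, List.set_cons_zero, hsel, hx, List.erase_cons_head]
      | succ n =>
          have hc : s + ((n + 1 : Nat) : Int) = (s + 1) + (n : Int) := by push_cast; ring
          rw [hc] at hsel hx ⊢
          simp only [List.set_cons_succ, List.getD_cons_succ] at hsel hx ⊢
          have hne : (s == (s + 1) + (n : Int)) = false := by
            simp only [beq_eq_false_iff_ne]; omega
          have ihx := ih (s + 1) n x (by simpa using hn) hsel hx
          by_cases h : sel (s, a) <;>
            simp [pvSelIdx, h, ihx, List.erase_cons, hne]

-- parity: a value selected as a note becomes unselectable after += 1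
theorem pvNoteSel_succ_false (tones : List String) (j val : Int)
    (h : pvNoteSel tones (j, val) = true) : pvNoteSel tones (j, val + 1) = false := by
  unfold pvNoteSel at h ⊢
  simp only [Bool.and_eq_true, beq_iff_eq] at h
  have hm : PySem.Int.mod val 2 = 1 := h.1
  have hne : PySem.Int.mod (val + 1) 2 ≠ 1 := by
    simp only [PySem.Int.mod, Int.fmod_eq_emod] at hm ⊢
    omega
  have hf : (PySem.Int.mod (val + 1) 2 == 1) = false := by simpa using hne
  rw [hf, Bool.false_and]

-- the argmin over the candidate triples projects to the argmin over the note indices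
theorem pvArgmin_triples (i : Int) :
    ∀ (l : List (Int × Int)) (c : Int × Int),
      (l.map (fun q => (q.2, q.1, |i - q.1|))).foldl
          (fun mp t => if t.2.2 < mp.2.2 then t else mp) (c.2, c.1, |i - c.1|)
        = (fun q => (q.2, q.1, |i - q.1|)) (l.foldl (fun mq q => if |i - q.1| < |i - mq.1| then q else mq) c) := by
  intro l
  induction l with
  | nil => intro c; simp
  | cons q t ih =>
      intro c
      simp only [List.map_cons, List.foldl_cons]
      by_cases h : |i - q.1| < |i - c.1| <;> simp [h, ih]

theorem pvMin?_fst (i : Int) :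
    ∀ (l : List (Int × Int)) (c : Int × Int),
      PySem.List.min? ((c :: l).map (·.1)) (fun k => |i - k|)
        = some (l.foldl (fun mq q => if |i - q.1| < |i - mq.1| then q else mq) c).1 := by
  have aux : ∀ (f : Option Int → Int → Option Int),
      (∀ m x, f (some m) x = if |i - x| < |i - m| then some x else some m) →
      ∀ (l : List (Int × Int)) (c : Int × Int),
        (l.map (·.1)).foldl f (some c.1)
          = some (l.foldl (fun mq q => if |i - q.1| < |i - mq.1| then q else mq) c).1 := by
    intro f hf l
    induction l with
    | nil => intro c; simp
    | cons q t ih =>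
        intro c
        simp only [List.map_cons, List.foldl_cons, hf]
        by_cases h : |i - q.1| < |i - c.1| <;> simp [h, ih]
  intro l c
  simp only [PySem.List.min?, List.map_cons, List.foldl_cons]
  exact aux _ (fun m x => rfl) l c

-- A's outer fold over all enumerated pairs is the fold of the pause body over the pause indices
theorem pvFoldFilter (tones : List String) :
    ∀ (e : List (Int × Int)) (v : List Int),
      e.foldl (fun v p => if pvPauseSel tones p then pvBodyA tones v p.1 else v) v
        = (e.filterMap (fun q => if pvPauseSel tones q then some q.1 else none)).foldl (pvBodyA tones) v := by
  intro e
  induction e with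
  | nil => intro v; simp
  | cons p t ih =>
      intro v
      by_cases h : pvPauseSel tones p <;> simp [List.filterMap_cons, h, ih]

-- one step of B, started from a state satisfying the invariant, performs A's pause body and
-- re-establishes the invariant
theorem pvStep_agree (tones : List String) (v : List Int) (i : Int)
    (hk : ∃ k : Nat, k < v.length ∧ i = (k : Int))
    (hz : (PySem.List.pyGetD tones i "" == "z") = true) :
    pvStepB tones (v, pvSelIdx (pvNoteSel tones) 0 v) i
      = (pvBodyA tones v i, pvSelIdx (pvNoteSel tones) 0 (pvBodyA tones v i)) := by
  obtain ⟨ki, hki, rfl⟩ := hk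
  have hcand :
      (PySem.List.enumerate v).foldl
        (fun acc q => if pvNoteSel tones q then acc ++ [(q.2, q.1, |(ki : Int) - q.1|)] else acc) []
        = ((PySem.List.enumerate v).filter (pvNoteSel tones)).map
            (fun q => (q.2, q.1, |(ki : Int) - q.1|)) := by
    simpa using PySem.List.foldl_append_if (pvNoteSel tones)
      (fun q => (q.2, q.1, |(ki : Int) - q.1|)) (PySem.List.enumerate v) []
  have hnmap : pvSelIdx (pvNoteSel tones) 0 v
      = ((PySem.List.enumerate v).filter (pvNoteSel tones)).map (·.1) :=
    pvSelIdx_eq_map_filter _ v 0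
  cases hmin : PySem.List.min? (pvSelIdx (pvNoteSel tones) 0 v) (fun k => |(ki : Int) - k|) with
  | none =>
      have hempty : pvSelIdx (pvNoteSel tones) 0 v = [] := by
        simpa using (PySem.List.min?_eq_none_iff _ _).mp hmin
      have hfil : (PySem.List.enumerate v).filter (pvNoteSel tones) = [] := by
        have := hnmap.symm.trans hempty
        exact List.map_eq_nil_iff.mp this
      have hbody : pvBodyA tones v (ki : Int) = v := by
        unfold pvBodyA
        simp [hcand, hfil]
      simp only [pvStepB, hmin, hbody]
  | some j =>
      -- the filtered list is nonempty
      have hne : (PySem.List.enumerate v).filter (pvNoteSel tones) ≠ [] := by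
        intro h0
        rw [hnmap, h0] at hmin
        simp [PySem.List.min?] at hmin
      obtain ⟨c, rest, hw⟩ := List.exists_cons_of_ne_nil hne
      -- identify j
      have hj : j = (rest.foldl (fun mq q => if |(ki : Int) - q.1| < |(ki : Int) - mq.1| then q else mq) c).1 := by
        have := pvMin?_fst (ki : Int) rest c
        rw [hnmap, hw] at hmin
        rw [hmin] at this
        exact (Option.some_inj.mp this.symm).symm
      -- j is a member of the notes list
      have hjmem : j ∈ pvSelIdx (pvNoteSel tones) 0 v := PySem.List.min?_mem hmin
      obtain ⟨kj, hkj, hjk, hjsel⟩ := (pvMem_selIdx _ v 0 j).mp hjmem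
      simp only [zero_add] at hjk
      subst hjk
      -- i and j are distinct positions
      have hij : ki ≠ kj := by
        intro h
        have h2 := hjsel
        unfold pvNoteSel at h2
        rw [Bool.and_eq_true] at h2
        have h3 := h2.2
        rw [← h, hz] at h3
        simp at h3
      -- compute pvBodyA
      have hbody : pvBodyA tones v (ki : Int)
          = PySem.List.pySetD
              (PySem.List.pySetD v (ki : Int) (PySem.List.pyGetD v (ki : Int) 0 - 1)) (kj : Int)
              (PySem.List.pyGetD
                (PySem.List.pySetD v (ki : Int) (PySem.List.pyGetD v (ki : Int) 0 - 1)) (kj : Int) 0 + 1) := by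
        unfold pvBodyA
        simp only [hcand, hw, List.map_cons]
        simp only [List.length_cons, List.length_map, if_true, Nat.zero_lt_succ]
        have hfold := PySem.List.foldl_pyRange_pyGetD
          ((c.2, c.1, |(ki : Int) - c.1|) :: rest.map (fun q => (q.2, q.1, |(ki : Int) - q.1|)))
          ((0 : Int), (0 : Int), (0 : Int))
          (fun mp t => if t.2.2 < mp.2.2 then t else mp)
          (PySem.List.pyGetD ((c.2, c.1, |(ki : Int) - c.1|) :: rest.map (fun q => (q.2, q.1, |(ki : Int) - q.1|))) 0 ((0 : Int), (0 : Int), (0 : Int)))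
          (a := 1) (by norm_num)
        simp only [] at hfold
        rw [hfold]
        have hdrop : ((c.2, c.1, |(ki : Int) - c.1|) :: rest.map (fun q => (q.2, q.1, |(ki : Int) - q.1|))).drop (1 : Int).toNat
            = rest.map (fun q => (q.2, q.1, |(ki : Int) - q.1|)) := by simp
        rw [hdrop]
        simp only [PySem.List.pyGetD_zero_cons]
        have harg := pvArgmin_triples (ki : Int) rest c
        simp only [harg]
        rw [← hj]
      -- the updated values list
      set v1 := PySem.List.pySetD v (ki : Int) (PySem.List.pyGetD v (ki : Int) 0 - 1) with hv1
      have hv1set : v1 = v.set ki (PySem.List.pyGetD v (ki : Int) 0 - 1) := by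
        rw [hv1, PySem.List.pySetD_natCast]
      -- notes of v1 = notes of v (position ki is never a note: its tone is "z")
      have hsel_ki : ∀ y : Int, pvNoteSel tones ((ki : Int), y) = false := by
        intro y
        unfold pvNoteSel
        rw [hz]
        simp
      have hn1 : pvSelIdx (pvNoteSel tones) 0 v1 = pvSelIdx (pvNoteSel tones) 0 v := by
        rw [hv1set]
        apply pvSelIdx_set_irrel
        simp only [zero_add]
        rw [hsel_ki, hsel_ki]
      -- value at kj is unchanged in v1
      have hlen1 : v1.length = v.length := by rw [hv1set]; simp
      have hget1 : v1.getD kj 0 = v.getD kj 0 := by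
        rw [hv1set]
        rw [List.getD_eq_getElem?_getD, List.getD_eq_getElem?_getD]
        rw [List.getElem?_set_ne (by omega)]
      have hpy1 : PySem.List.pyGetD v1 (kj : Int) 0 = v1.getD kj 0 := PySem.List.pyGetD_natCast v1 kj 0
      -- notes of the final list = notes of v erased at j
      have hjsel1 : pvNoteSel tones ((kj : Int), v1.getD kj 0) = true := by rw [hget1]; exact hjsel
      have hkill : pvNoteSel tones ((kj : Int), v1.getD kj 0 + 1) = false :=
        pvNoteSel_succ_false tones _ _ hjsel1
      have hn2 : pvSelIdx (pvNoteSel tones) 0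
            (PySem.List.pySetD v1 (kj : Int) (PySem.List.pyGetD v1 (kj : Int) 0 + 1))
          = (pvSelIdx (pvNoteSel tones) 0 v).erase (kj : Int) := by
        rw [hpy1, PySem.List.pySetD_natCast]
        have := pvSelIdx_set_erase (pvNoteSel tones) v1 0 kj (v1.getD kj 0 + 1)
          (by omega) (by simpa using hjsel1) (by simpa using hkill)
        rw [this, hn1]
        simp
      -- the remove? on the B side is erase
      have hrem : (PySem.List.remove? (pvSelIdx (pvNoteSel tones) 0 v) (kj : Int)).getD
            (pvSelIdx (pvNoteSel tones) 0 v)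
          = (pvSelIdx (pvNoteSel tones) 0 v).erase (kj : Int) := by
        rw [PySem.List.remove?_eq_some_erase _ _ hjmem]
        rfl
      simp only [pvStepB, hmin, hbody, hrem, ← hv1, hn2]

-- the main loop correspondence
theorem pvMain (tones : List String) :
    ∀ (ps : List Int) (v : List Int),
      (∀ i ∈ ps, (∃ k : Nat, k < v.length ∧ i = (k : Int)) ∧ (PySem.List.pyGetD tones i "" == "z") = true) →
      (ps.foldl (pvStepB tones) (v, pvSelIdx (pvNoteSel tones) 0 v)).1
        = ps.foldl (pvBodyA tones) v := by
  intro ps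
  induction ps with
  | nil => intro v _; rfl
  | cons i t ih =>
      intro v hps
      obtain ⟨hk, hz⟩ := hps i (by simp)
      simp only [List.foldl_cons, pvStep_agree tones v i hk hz]
      have hlen : (pvBodyA tones v i).length = v.length := by
        have hstep := pvStep_agree tones v i hk hz
        have hb : pvBodyA tones v i = (pvStepB tones (v, pvSelIdx (pvNoteSel tones) 0 v) i).1 := by
          rw [hstep]
        rw [hb]
        cases hm : PySem.List.min? (pvSelIdx (pvNoteSel tones) 0 v) (fun k => |i - k|) with
        | none => simp [pvStepB, hm]
        | some j => simp [pvStepB, hm, PySem.List.length_pySetD]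
      exact ih (pvBodyA tones v i) (fun j hj => by
        obtain ⟨⟨k, hkl, hkj⟩, hzj⟩ := hps j (by simp [hj])
        exact ⟨⟨k, by omega, hkj⟩, hzj⟩)

-- ===== VERDICT (by name: the statement is the Claim_ definition above) =====
theorem merge_pause_and_note_spec : Claim_equal_merge_pause_and_note := by
  intro v tones _ _
  show merge_pause_and_note v tones = merge_pause_and_note_alt v tones
  have hA : merge_pause_and_note v tones
      = (pvSelIdx (pvPauseSel tones) 0 v).foldl (pvBodyA tones) v := by
    rw [← pvSelIdx_eq_filterMap]
    exact pvFoldFilter tones (PySem.List.enumerate v) v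
  have hB : merge_pause_and_note_alt v tones
      = ((pvSelIdx (pvPauseSel tones) 0 v).foldl (pvStepB tones)
          (v, pvSelIdx (pvNoteSel tones) 0 v)).1 := by
    show (((PySem.List.enumerate v).filterMap
        (fun q => if pvPauseSel tones q then some q.1 else none)).foldl (pvStepB tones)
        (v, (PySem.List.enumerate v).filterMap
          (fun q => if pvNoteSel tones q then some q.1 else none))).1 = _
    rw [pvSelIdx_eq_filterMap, pvSelIdx_eq_filterMap]
  rw [hA, hB]
  refine (pvMain tones _ v ?_).symm
  intro i hi
  obtain ⟨k, hk, hik, hsel⟩ := (pvMem_selIdx _ v 0 i).mp hi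
  refine ⟨⟨k, hk, by omega⟩, ?_⟩
  unfold pvPauseSel at hsel
  rw [Bool.and_eq_true] at hsel
  exact hsel.2
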